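-- pv_equiv track=rewrite | github.com/MohammadAminDHM/Filoger | Solve-Exercise/Python_EX01/korrani/1.py | BuildCharacterFrequencyDict
-- ===== SOURCE A (Python) =====
-- def BuildCharacterFrequencyDict(UserText):
--     #This function makes a dictionary of characters and their related Frequency in the input text
--
--     CharacterFrequency={}
--     UserText=(UserText.replace(" ","")).lower()
--     UserText=sorted(UserText)
--
--     for CurrentCharacter in UserText:
--         if CurrentCharacter not in CharacterFrequency:
--             CharacterFrequency[CurrentCharacter]=1
--         else :
--             CharacterFrequency[CurrentCharacter] += 1
--
--     return CharacterFrequency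
-- ===== SOURCE B (Python) =====
-- def BuildCharacterFrequencyDict(UserText):
--     # Idiomatic rewrite: dict comprehension over the sorted distinct characters,
--     # counting each with str.count, instead of a single accumulation pass.
--     cleaned = UserText.replace(" ", "").lower()
--     return {c: cleaned.count(c) for c in sorted(set(cleaned))}
-- ===== Notes on version B (the rewrite author's own statement) =====
-- stated objective: idiomatic
-- what changed: A sorts all characters and builds the dict in one accumulation pass with per-character membership tests; B builds the sorted set of distinct characters once and counts each with a full-string str.count scan in a dict comprehension.
import Mathlib
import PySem

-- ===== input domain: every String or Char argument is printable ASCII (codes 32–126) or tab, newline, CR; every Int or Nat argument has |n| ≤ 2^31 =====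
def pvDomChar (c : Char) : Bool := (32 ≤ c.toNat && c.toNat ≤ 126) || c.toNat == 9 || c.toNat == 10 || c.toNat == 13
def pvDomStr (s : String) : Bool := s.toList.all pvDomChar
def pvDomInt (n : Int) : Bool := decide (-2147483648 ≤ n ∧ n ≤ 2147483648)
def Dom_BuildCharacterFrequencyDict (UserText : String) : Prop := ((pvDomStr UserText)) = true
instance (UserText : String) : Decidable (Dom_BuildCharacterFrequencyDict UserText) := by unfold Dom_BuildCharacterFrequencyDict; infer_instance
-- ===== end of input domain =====

-- B replaces A's single accumulation pass over the sorted character list by a map over the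
-- sorted distinct-character set, counting each character with a full-string scan (idiomatic).

-- ===== PORT A =====
def BuildCharacterFrequencyDict (UserText : String) : List (String × Int) :=
  let cleaned := PySem.Str.lower (PySem.Str.replace UserText " " "")
  let sortedChars := PySem.List.sorted cleaned.toList (fun c => c)
  let d := sortedChars.foldl
    (fun (d : PySem.Dict String Int) c =>
      if !(d.contains c.toString) then d.insert c.toString 1
      else d.insert c.toString (d.getD c.toString 0 + 1))
    PySem.Dict.empty
  d.items

-- ===== PORT B =====
def BuildCharacterFrequencyDict_alt (UserText : String) : List (String × Int) :=
  let cleaned := PySem.Str.lower (PySem.Str.replace UserText " " "")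
  (PySem.List.sorted (PySem.Set.ofList cleaned.toList) (fun c => c)).map
    (fun c => (c.toString, (PySem.Str.count cleaned c.toString : Int)))

-- ===== PRECONDITION & SPEC =====
def Spec_BuildCharacterFrequencyDict (UserText : String) (out : List (String × Int)) : Prop := out = BuildCharacterFrequencyDict_alt UserText
instance (UserText : String) (out : List (String × Int)) : Decidable (Spec_BuildCharacterFrequencyDict UserText out) := by unfold Spec_BuildCharacterFrequencyDict; infer_instance

-- ===== CLAIM (what is proved, stated in full; the proofs are below) =====
def Claim_equal_BuildCharacterFrequencyDict : Prop := ∀ (UserText : String), Dom_BuildCharacterFrequencyDict UserText → Spec_BuildCharacterFrequencyDict UserText (BuildCharacterFrequencyDict UserText)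

-- ===== LEMMAS AND PROOFS =====

-- A's if/else step is exactly the counter step.
theorem pv_step_eq :
    (fun (d : PySem.Dict String Int) (c : Char) =>
      if !(d.contains c.toString) then d.insert c.toString 1
      else d.insert c.toString (d.getD c.toString 0 + 1))
    = fun (d : PySem.Dict String Int) (c : Char) =>
        d.insert c.toString (d.getD c.toString 0 + 1) := by
  funext d c
  by_cases h : d.contains c.toString = true
  · rw [h]
    rfl
  · have h' : d.contains c.toString = false := eq_false_of_ne_true h
    rw [h', PySem.Dict.getD_of_not_contains d 0 h']
    simp

theorem pv_discard_map {a b : Type} [BEq a] [LawfulBEq a] [BEq b] [LawfulBEq b]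
    (f : a → b) (hf : Function.Injective f) (s : List a) (x : a) :
    PySem.Set.discard (s.map f) (f x) = (PySem.Set.discard s x).map f := by
  simp only [PySem.Set.discard, List.filter_map]
  congr 1
  apply List.filter_congr
  intro y _
  simp [Function.comp, hf.eq_iff]

theorem pv_ofList_map {a b : Type} [BEq a] [LawfulBEq a] [BEq b] [LawfulBEq b]
    (f : a → b) (hf : Function.Injective f) (xs : List a) :
    PySem.Set.ofList (xs.map f) = (PySem.Set.ofList xs).map f := by
  induction xs with
  | nil => rfl
  | cons x xs ih =>
    simp only [List.map_cons, PySem.Set.ofList_cons, ih, List.map_cons]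
    rw [pv_discard_map f hf]

theorem pv_ofList_sublist {a : Type} [BEq a] [LawfulBEq a] (xs : List a) :
    List.Sublist (PySem.Set.ofList xs) xs := by
  induction xs with
  | nil => simp [PySem.Set.ofList]
  | cons x xs ih =>
    rw [PySem.Set.ofList_cons]
    exact List.Sublist.cons₂ x (List.Sublist.trans List.filter_sublist ih)

-- sorted(set(cs)) is the ordered dedup of sorted(cs).
theorem pv_sorted_set (cs : List Char) :
    PySem.List.sorted (PySem.Set.ofList cs) (fun c => c)
      = PySem.Set.ofList (PySem.List.sorted cs (fun c => c)) := by
  apply PySem.List.sorted_eq_of_perm_of_pairwise_lt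
  · rw [List.perm_ext_iff_of_nodup (PySem.Set.nodup_ofList _) (PySem.Set.nodup_ofList _)]
    intro a
    simp [PySem.Set.mem_ofList, PySem.List.mem_sorted]
  · have hle : List.Pairwise (fun a b : Char => a ≤ b)
        (PySem.Set.ofList (PySem.List.sorted cs (fun c => c))) :=
      (PySem.List.sorted_pairwise cs (fun c => c)).sublist (pv_ofList_sublist _)
    have hne : List.Pairwise (fun a b : Char => a ≠ b)
        (PySem.Set.ofList (PySem.List.sorted cs (fun c => c))) :=
      PySem.Set.nodup_ofList _
    exact (hle.and hne).imp (fun h => lt_of_le_of_ne h.1 h.2)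

theorem pv_count_go (c : Char) (l : List Char) (acc fuel : Nat) (h : l.length ≤ fuel) :
    PySem.Chars.count.go [c] fuel l acc = acc + l.count c := by
  induction fuel generalizing l acc with
  | zero =>
    have : l = [] := List.eq_nil_of_length_eq_zero (Nat.le_zero.mp h)
    subst this; rfl
  | succ n ih =>
    cases l with
    | nil => rfl
    | cons x t =>
      have ht : t.length ≤ n := Nat.le_of_succ_le_succ (by simpa using h)
      by_cases hx : x = c
      · subst hx
        simp only [PySem.Chars.count.go, List.isPrefixOf, List.length]
        rw [if_pos (by simp)]
        simp only [List.drop_succ_cons, List.drop_zero]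
        rw [ih t (acc + 1) ht]
        simp
        omega
      · simp only [PySem.Chars.count.go]
        rw [if_neg (by simp [List.isPrefixOf]; exact fun hh => hx (by simpa using hh.symm))]
        rw [ih t acc ht]
        simp [hx]

theorem pv_count_singleton (cs : List Char) (c : Char) :
    PySem.Chars.count cs [c] = cs.count c := by
  simpa [PySem.Chars.count] using pv_count_go c cs 0 cs.length le_rfl

theorem pv_toList_toString (c : Char) : c.toString.toList = [c] := by simp

theorem pv_toString_inj : Function.Injective Char.toString := by
  intro x y h
  have := congrArg String.toList h
  simpa [pv_toList_toString] using this

theorem pv_str_count (s : String) (c : Char) :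
    PySem.Str.count s c.toString = s.toList.count c := by
  show PySem.Chars.count s.toList c.toString.toList = s.toList.count c
  rw [pv_toList_toString c, pv_count_singleton]

-- A's fold over the sorted characters, as a map over the sorted distinct characters.
theorem pv_A_eq (cs : List Char) :
    (List.foldl (fun (d : PySem.Dict String Int) c =>
      if !(d.contains c.toString) then d.insert c.toString 1
      else d.insert c.toString (d.getD c.toString 0 + 1)) PySem.Dict.empty
      (PySem.List.sorted cs (fun c => c))).items
    = (PySem.List.sorted (PySem.Set.ofList cs) (fun c => c)).map
        (fun c => (c.toString, ((cs.count c : Nat) : Int))) := by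
  rw [pv_step_eq]
  rw [← List.foldl_map (f := Char.toString)
      (g := fun (d : PySem.Dict String Int) k => d.insert k (d.getD k 0 + 1))]
  rw [PySem.Dict.foldl_insert_getD_add_one_eq_counter, PySem.Dict.items_counter]
  rw [pv_ofList_map Char.toString pv_toString_inj, ← pv_sorted_set, List.map_map]
  apply List.map_congr_left
  intro c _
  simp only [Function.comp]
  congr 1
  rw [List.count_map_of_injective _ Char.toString pv_toString_inj]
  rw [(PySem.List.sorted_perm cs (fun c => c) false).count_eq]

-- ===== VERDICT (by name: the statement is the Claim_ definition above) =====
set_option maxHeartbeats 1000000 in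
theorem BuildCharacterFrequencyDict_spec : Claim_equal_BuildCharacterFrequencyDict := by
  intro UserText _
  show BuildCharacterFrequencyDict UserText = BuildCharacterFrequencyDict_alt UserText
  show (List.foldl (fun (d : PySem.Dict String Int) c =>
      if !(d.contains c.toString) then d.insert c.toString 1
      else d.insert c.toString (d.getD c.toString 0 + 1)) PySem.Dict.empty
      (PySem.List.sorted (PySem.Str.lower (PySem.Str.replace UserText " " "")).toList
        (fun c => c))).items
    = (PySem.List.sorted
        (PySem.Set.ofList (PySem.Str.lower (PySem.Str.replace UserText " " "")).toList)
        (fun c => c)).map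
        (fun c => (c.toString,
          (PySem.Str.count (PySem.Str.lower (PySem.Str.replace UserText " " "")) c.toString : Int)))
  rw [pv_A_eq]
  apply List.map_congr_left
  intro c _
  rw [pv_str_count]
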